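-- pv_equiv track=rewrite | github.com/sejongmin/Python_study | 백준/Silver/19941. 햄버거 분배/햄버거 분배.py | solution
-- ===== SOURCE A (Python) =====
-- def solution(N: int, K: int, desk: list) -> int:
--     eat = [0] * N
--     for i in range(N):
--         if desk[i] == 'P':
--             for j in range(max(0, i - K), min(i + K + 1, N)):
--                 if desk[j] == 'H' and eat[j] == 0:
--                     eat[j] = 1
--                     break
--     return sum(eat)
-- ===== SOURCE B (Python) =====
-- def solution(N: int, K: int, desk: list) -> int:
--     count = 0
--     j = 0  # next desk position that may still hold an unused hamburger
--     for i in range(N):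
--         if desk[i] == 'P':
--             if j < i - K:
--                 j = i - K
--             while j < N and j <= i + K and desk[j] != 'H':
--                 j += 1
--             if j < N and j <= i + K:
--                 count += 1
--                 j += 1
--     return count
-- ===== Notes on version B (the rewrite author's own statement) =====
-- stated objective: alternative
-- what changed: Replaced the per-person rescan of the 2K+1-wide window over a marker array with a single monotone pointer that is clamped to i-K, skips non-hamburger seats once and for all, and matches the next hamburger if it lies within i+K; no marker array, one sweep state (count, pointer).
import Mathlib
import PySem

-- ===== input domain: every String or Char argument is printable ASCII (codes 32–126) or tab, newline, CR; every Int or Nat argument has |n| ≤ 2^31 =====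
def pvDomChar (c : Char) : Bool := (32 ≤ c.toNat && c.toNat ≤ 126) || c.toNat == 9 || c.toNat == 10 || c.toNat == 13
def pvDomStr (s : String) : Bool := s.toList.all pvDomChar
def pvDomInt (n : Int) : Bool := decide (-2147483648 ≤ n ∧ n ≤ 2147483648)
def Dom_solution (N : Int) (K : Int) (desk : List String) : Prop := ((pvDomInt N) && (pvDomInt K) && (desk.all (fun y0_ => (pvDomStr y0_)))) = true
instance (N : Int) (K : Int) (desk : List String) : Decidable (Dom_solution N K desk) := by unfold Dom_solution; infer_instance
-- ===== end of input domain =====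

-- B replaces A's marker array and per-person window rescan with a single monotone pointer sweep carrying (count, pointer); return value proved equal.

-- ===== PORT A =====
-- inner loop: 'for j in range(max(0,i-K), min(i+K+1,N)): if desk[j]=="H" and eat[j]==0: eat[j]=1; break'
def solInner (desk : List String) (js : List Int) (eat : List Int) : List Int :=
  match js with
  | [] => eat
  | j :: rest =>
    if PySem.List.pyGetD desk j "" == "H" && PySem.List.pyGetD eat j 1 == 0 then
      PySem.List.pySetD eat j 1
    else
      solInner desk rest eat

def stepA (N : Int) (K : Int) (desk : List String) (eat : List Int) (i : Int) : List Int :=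
  if PySem.List.pyGetD desk i "" == "P" then
    solInner desk (PySem.List.pyRange (max 0 (i - K)) (min (i + K + 1) N) 1) eat
  else eat

def solution (N : Int) (K : Int) (desk : List String) : Int :=
  ((PySem.List.pyRange 0 N 1).foldl (stepA N K desk) (List.replicate N.toNat 0)).sum

-- ===== PORT B =====
-- 'while j < N and j <= i + K and desk[j] != "H": j += 1'
def skipB (desk : List String) (N : Int) (K : Int) (i : Int) (j : Int) : Int :=
  if h : j < N ∧ j ≤ i + K ∧ ¬(PySem.List.pyGetD desk j "" == "H") then
    skipB desk N K i (j + 1)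
  else j
termination_by (N - j).toNat
decreasing_by omega

def stepB (N : Int) (K : Int) (desk : List String) (s : Int × Int) (i : Int) : Int × Int :=
  if PySem.List.pyGetD desk i "" == "P" then
    let j0 := if s.2 < i - K then i - K else s.2
    let j1 := skipB desk N K i j0
    if j1 < N ∧ j1 ≤ i + K then (s.1 + 1, j1 + 1) else (s.1, j1)
  else s

def solution_alt (N : Int) (K : Int) (desk : List String) : Int :=
  ((PySem.List.pyRange 0 N 1).foldl (stepB N K desk) (0, 0)).1

-- ===== PRECONDITION & SPEC =====
-- A (and B) raise IndexError when N > len(desk); those inputs are excluded.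
def Pre_solution (N : Int) (K : Int) (desk : List String) : Prop := N ≤ (desk.length : Int)
instance (N : Int) (K : Int) (desk : List String) : Decidable (Pre_solution N K desk) := by unfold Pre_solution; infer_instance
def pvWitness_solution : Int × Int × List String := (4, 1, ["P", "H", "H", "P"])

def Spec_solution (N : Int) (K : Int) (desk : List String) (out : Int) : Prop := out = solution_alt N K desk
instance (N : Int) (K : Int) (desk : List String) (out : Int) : Decidable (Spec_solution N K desk out) := by unfold Spec_solution; infer_instance

-- ===== CLAIM (what is proved, stated in full; the proofs are below) =====
def Claim_equal_solution : Prop := ∀ (N : Int) (K : Int) (desk : List String), Dom_solution N K desk → Pre_solution N K desk → Spec_solution N K desk (solution N K desk)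

-- ===== LEMMAS AND PROOFS =====

-- loop invariant tying A's marker array to B's (count, pointer) state after the people with index < i have been processed
def HInv (N : Int) (K : Int) (desk : List String) (i : Int) (eat : List Int) (c : Int) (j : Int) : Prop :=
  eat.length = N.toNat ∧ 0 ≤ j ∧ eat.sum = c ∧
  ∀ h : Nat, h < N.toNat → desk.getD h "" = "H" →
    (((h : Int) < j) → (eat.getD h 0 = 1 ∨ (h : Int) < i - K)) ∧
    ((j ≤ (h : Int)) → eat.getD h 0 = 0)


-- pyGetD with a nonnegative in-range Int index is List.getD at the cast index
lemma pyGetD_toNat {α : Type} (xs : List α) (m : Int) (d : α) (h0 : 0 ≤ m) (h : m < (xs.length : Int)) :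
    PySem.List.pyGetD xs m d = xs.getD m.toNat d := by
  rw [PySem.List.pyGetD_eq_getElem xs d h0 h, List.getD_eq_getElem _ _ (by omega)]

-- setting a zero entry to one raises the sum by one
lemma sum_set_one (l : List Int) (k : Nat) (hk : k < l.length) (h0 : l.getD k 0 = 0) :
    (l.set k 1).sum = l.sum + 1 := by
  have h0' : l[k] = 0 := by rwa [List.getD_eq_getElem _ _ hk] at h0
  have hsplit : l.sum = (l.take k).sum + (l[k] + (l.drop (k + 1)).sum) := by
    calc l.sum = (l.take k ++ l.drop k).sum := by rw [List.take_append_drop]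
    _ = (l.take k).sum + (l.drop k).sum := List.sum_append ..
    _ = (l.take k).sum + (l[k] + (l.drop (k + 1)).sum) := by
        rw [List.drop_eq_getElem_cons hk, List.sum_cons]
  rw [List.sum_set, if_pos hk]
  omega

lemma getD_set_self (l : List Int) (k : Nat) (hk : k < l.length) :
    (l.set k (1 : Int)).getD k 0 = 1 := by
  rw [List.getD_eq_getElem _ _ (by simpa using hk), List.getElem_set, if_pos rfl]

lemma getD_set_ne (l : List Int) (k h : Nat) (hh : h < l.length) (hne : k ≠ h) :
    (l.set k (1 : Int)).getD h 0 = l.getD h 0 := by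
  rw [List.getD_eq_getElem _ _ (by simpa using hh), List.getElem_set, if_neg hne,
    List.getD_eq_getElem _ _ hh]

-- A's inner scan ignores a prefix of indices none of which is a hit
lemma solInner_no_hit (desk : List String) (eat : List Int) (l1 l2 : List Int)
    (h : ∀ m ∈ l1, (PySem.List.pyGetD desk m "" == "H" && PySem.List.pyGetD eat m 1 == 0) = false) :
    solInner desk (l1 ++ l2) eat = solInner desk l2 eat := by
  induction l1 with
  | nil => simp
  | cons x xs ih =>
    have hx := h x (by simp)
    simp only [List.cons_append, solInner, hx]
    exact ih (fun m hm => h m (by simp [hm]))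

-- the joint march: from a pointer position cur at which every hamburger to the right is unused,
-- B's while-loop and A's scan of [cur, min(i+K+1,N)) agree
lemma march (N K i : Int) (desk : List String) (eat : List Int)
    (hpre : N ≤ (desk.length : Int)) (helen : eat.length = N.toNat) :
    ∀ (n : Nat) (cur : Int), (N - cur).toNat ≤ n → 0 ≤ cur →
    (∀ h : Nat, h < N.toNat → cur ≤ (h : Int) → desk.getD h "" = "H" → eat.getD h 0 = 0) →
    ( cur ≤ skipB desk N K i cur ∧
      (∀ m : Nat, cur ≤ (m : Int) → (m : Int) < skipB desk N K i cur → ¬ desk.getD m "" = "H") ∧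
      (if skipB desk N K i cur < N ∧ skipB desk N K i cur ≤ i + K then
        desk.getD (skipB desk N K i cur).toNat "" = "H" ∧
        eat.getD (skipB desk N K i cur).toNat 0 = 0 ∧
        solInner desk (PySem.List.pyRange cur (min (i + K + 1) N) 1) eat
          = eat.set (skipB desk N K i cur).toNat 1
      else solInner desk (PySem.List.pyRange cur (min (i + K + 1) N) 1) eat = eat) ) := by
  intro n
  induction n with
  | zero =>
    intro cur hfuel hcur0 hzero
    have hNcur : N ≤ cur := by omega
    rw [skipB, dif_neg (by omega)]
    refine ⟨le_refl _, fun m h1 h2 => absurd (lt_of_le_of_lt h1 h2) (lt_irrefl _), ?_⟩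
    rw [if_neg (by omega), PySem.List.pyRange_one_eq_nil (by omega)]
    rfl
  | succ n ih =>
    intro cur hfuel hcur0 hzero
    by_cases hskip : cur < N ∧ cur ≤ i + K ∧ ¬(PySem.List.pyGetD desk cur "" == "H")
    · -- the while-loop advances past a non-hamburger seat
      obtain ⟨h1, h2, h3⟩ := hskip
      have hsk : skipB desk N K i cur = skipB desk N K i (cur + 1) := by
        rw [skipB]; rw [dif_pos ⟨h1, h2, h3⟩]
      have hcurH : ¬ desk.getD cur.toNat "" = "H" := by
        intro hH
        exact h3 (by rw [pyGetD_toNat desk cur "" hcur0 (by omega), hH]; rfl)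
      have ihc := ih (cur + 1) (by omega) (by omega)
        (fun h hh1 hh2 hh3 => hzero h hh1 (by omega) hh3)
      rw [hsk]
      obtain ⟨c1, c2, c3⟩ := ihc
      refine ⟨by omega, ?_, ?_⟩
      · intro m hm1 hm2
        by_cases hmc : (m : Int) = cur
        · have : m = cur.toNat := by omega
          rw [this]; exact hcurH
        · exact c2 m (by omega) hm2
      · have hcons : PySem.List.pyRange cur (min (i + K + 1) N) 1
            = cur :: PySem.List.pyRange (cur + 1) (min (i + K + 1) N) 1 := by
          rw [PySem.List.pyRange_one_cons (by omega)]
        have hhit : (PySem.List.pyGetD desk cur "" == "H" && PySem.List.pyGetD eat cur 1 == 0) = false := by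
          simp only [Bool.and_eq_false_iff]
          left; simpa using h3
        rw [hcons]
        simp only [solInner, hhit]
        exact c3
    · -- the while-loop stops at cur
      have hstop : skipB desk N K i cur = cur := by
        rw [skipB]; rw [dif_neg hskip]
      rw [hstop]
      refine ⟨le_refl _, fun m h1 h2 => absurd (lt_of_le_of_lt h1 h2) (lt_irrefl _), ?_⟩
      by_cases hin : cur < N ∧ cur ≤ i + K
      · -- it stopped on a hamburger inside the window
        have hH : PySem.List.pyGetD desk cur "" == "H" := by
          by_contra hc
          exact hskip ⟨hin.1, hin.2, hc⟩
        have hHd : desk.getD cur.toNat "" = "H" := by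
          have := pyGetD_toNat desk cur "" hcur0 (by omega)
          rw [this] at hH
          exact eq_of_beq hH
        have hzcur : eat.getD cur.toNat 0 = 0 :=
          hzero cur.toNat (by omega) (by omega) hHd
        rw [if_pos hin]
        refine ⟨hHd, hzcur, ?_⟩
        have hcons : PySem.List.pyRange cur (min (i + K + 1) N) 1
            = cur :: PySem.List.pyRange (cur + 1) (min (i + K + 1) N) 1 := by
          rw [PySem.List.pyRange_one_cons (by omega)]
        have hhit : (PySem.List.pyGetD desk cur "" == "H" && PySem.List.pyGetD eat cur 1 == 0) = true := by
          rw [Bool.and_eq_true]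
          refine ⟨hH, ?_⟩
          have : PySem.List.pyGetD eat cur 1 = eat.getD cur.toNat 1 :=
            pyGetD_toNat eat cur 1 hcur0 (by omega)
          rw [this, List.getD_eq_getElem _ _ (by omega)]
          rw [List.getD_eq_getElem _ _ (by omega)] at hzcur
          simp [hzcur]
        rw [hcons]
        simp only [solInner, hhit, if_true]
        rw [PySem.List.pySetD_of_nonneg eat 1 hcur0]
      · rw [if_neg hin, PySem.List.pyRange_one_eq_nil (by omega)]
        rfl

-- one outer-loop step preserves the invariant
lemma stepPreserve (N K : Int) (desk : List String) (i : Int) (eat : List Int) (c j : Int)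
    (hpre : N ≤ (desk.length : Int)) (hi0 : 0 ≤ i) (hiN : i < N)
    (hinv : HInv N K desk i eat c j) :
    HInv N K desk (i + 1) (stepA N K desk eat i)
      (stepB N K desk (c, j) i).1 (stepB N K desk (c, j) i).2 := by
  obtain ⟨hlen, hj0, hsum, hC4⟩ := hinv
  by_cases hP : PySem.List.pyGetD desk i "" == "P"
  case neg =>
    rw [stepA, if_neg hP, stepB, if_neg hP]
    exact ⟨hlen, hj0, hsum, fun h hh hH =>
      ⟨fun hlt => (hC4 h hh hH).1 hlt |>.imp id (by omega), (hC4 h hh hH).2⟩⟩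
  case pos =>
    rw [stepA, if_pos hP, stepB, if_pos hP]
    simp only
    set j0 : Int := if j < i - K then i - K else j with hj0def
    have hj0lb : j ≤ j0 ∧ i - K ≤ j0 ∧ 0 ≤ j0 := by
      constructor
      · by_cases hc : j < i - K <;> simp [hj0def, hc] <;> omega
      constructor
      · by_cases hc : j < i - K <;> simp [hj0def, hc] <;> omega
      · by_cases hc : j < i - K <;> simp [hj0def, hc] <;> omega
    -- the scan over [max 0 (i-K), min(i+K+1,N)) equals the scan over [j0, min(i+K+1,N))
    have hscan : solInner desk (PySem.List.pyRange (max 0 (i - K)) (min (i + K + 1) N) 1) eat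
        = solInner desk (PySem.List.pyRange j0 (min (i + K + 1) N) 1) eat := by
      by_cases hlohi : min (i + K + 1) N < max 0 (i - K)
      · rw [PySem.List.pyRange_one_eq_nil (by omega), PySem.List.pyRange_one_eq_nil (by omega)]
      · set mid : Int := min j0 (min (i + K + 1) N) with hmid
        have hsplit := PySem.List.pyRange_one_append (max 0 (i - K)) mid (min (i + K + 1) N)
          (by omega) (by omega)
        rw [hsplit]
        have hnohit : ∀ m ∈ PySem.List.pyRange (max 0 (i - K)) mid 1,
            (PySem.List.pyGetD desk m "" == "H" && PySem.List.pyGetD eat m 1 == 0) = false := by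
          intro m hm
          rw [PySem.List.mem_pyRange_one] at hm
          have hm0 : 0 ≤ m := by omega
          have hmN : m < N := by omega
          by_cases hmH : desk.getD m.toNat "" = "H"
          · -- a hamburger left of the pointer inside the window is already eaten
            have heat1 : eat.getD m.toNat 0 = 1 := by
              have := (hC4 m.toNat (by omega) hmH).1 (by omega)
              rcases this with h1 | h2
              · exact h1
              · omega
            simp only [Bool.and_eq_false_iff]
            right
            rw [pyGetD_toNat eat m 1 hm0 (by omega), List.getD_eq_getElem _ _ (by omega)]
            rw [List.getD_eq_getElem _ _ (by omega)] at heat1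
            simp [heat1]
          · simp only [Bool.and_eq_false_iff]
            left
            rw [pyGetD_toNat desk m "" hm0 (by omega)]
            simpa using hmH
        rw [solInner_no_hit desk eat _ _ hnohit]
        by_cases hj0hi : j0 ≤ min (i + K + 1) N
        · have : mid = j0 := by omega
          rw [this]
        · have h1 : mid = min (i + K + 1) N := by omega
          rw [h1, PySem.List.pyRange_one_eq_nil (le_refl _),
            PySem.List.pyRange_one_eq_nil (by omega)]
    have hmarch := march N K i desk eat hpre hlen (N - j0).toNat j0 (le_refl _) hj0lb.2.2
      (fun h hh1 hh2 hh3 => (hC4 h hh1 hh3).2 (by omega))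
    obtain ⟨m1, m2, m3⟩ := hmarch
    set j1 : Int := skipB desk N K i j0 with hj1
    by_cases hmatch : j1 < N ∧ j1 ≤ i + K
    case pos =>
      rw [if_pos hmatch] at m3 ⊢
      obtain ⟨mH, mz, mscan⟩ := m3
      change HInv _ _ _ _ _ (c + 1) (j1 + 1)
      rw [hscan, mscan]
      have hj1nat : j1.toNat < eat.length := by omega
      refine ⟨by simpa using hlen, by omega, ?_, ?_⟩
      · rw [sum_set_one eat j1.toNat hj1nat mz, hsum]
      · intro h hh hH
        constructor
        · intro hlt
          have hlt' : (h : Int) < j1 + 1 := hlt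
          by_cases hhj1 : h = j1.toNat
          · left; rw [hhj1]; exact getD_set_self eat j1.toNat hj1nat
          · have hne : j1.toNat ≠ h := fun hc => hhj1 hc.symm
            rw [getD_set_ne eat j1.toNat h (by omega) hne]
            by_cases hhj : (h : Int) < j
            · exact ((hC4 h hh hH).1 hhj).imp id (by omega)
            · by_cases hhj0 : (h : Int) < j0
              · -- j ≤ h < j0 forces j0 = i - K, so h is an expired hamburger
                right
                by_cases hc : j < i - K
                · simp only [hj0def, if_pos hc] at hhj0; omega
                · simp only [hj0def, if_neg hc] at hhj0; omega
              · exact absurd hH (m2 h (by omega) (by omega))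
        · intro hge
          have hge' : j1 + 1 ≤ (h : Int) := hge
          have hne : j1.toNat ≠ h := by omega
          rw [getD_set_ne eat j1.toNat h (by omega) hne]
          exact (hC4 h hh hH).2 (by omega)
    case neg =>
      rw [if_neg hmatch] at m3 ⊢
      change HInv _ _ _ _ _ c j1
      rw [hscan, m3]
      refine ⟨hlen, by omega, hsum, ?_⟩
      intro h hh hH
      constructor
      · intro hlt
        have hlt' : (h : Int) < j1 := hlt
        by_cases hhj : (h : Int) < j
        · exact ((hC4 h hh hH).1 hhj).imp id (by omega)
        · by_cases hhj0 : (h : Int) < j0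
          · right
            by_cases hc : j < i - K
            · simp only [hj0def, if_pos hc] at hhj0; omega
            · simp only [hj0def, if_neg hc] at hhj0; omega
          · exact absurd hH (m2 h (by omega) (by omega))
      · intro hge
        have hge' : j1 ≤ (h : Int) := hge
        exact (hC4 h hh hH).2 (by omega)

-- the outer fold keeps the two states aligned
lemma outer (N K : Int) (desk : List String) (hpre : N ≤ (desk.length : Int)) :
    ∀ (n : Nat) (i : Int) (eat : List Int) (c j : Int), (N - i).toNat ≤ n → 0 ≤ i →
    HInv N K desk i eat c j →
    ((PySem.List.pyRange i N 1).foldl (stepA N K desk) eat).sum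
      = ((PySem.List.pyRange i N 1).foldl (stepB N K desk) (c, j)).1 := by
  intro n
  induction n with
  | zero =>
    intro i eat c j hfuel hi0 hinv
    rw [PySem.List.pyRange_one_eq_nil (by omega)]
    exact hinv.2.2.1
  | succ n ih =>
    intro i eat c j hfuel hi0 hinv
    by_cases hiN : i < N
    · rw [PySem.List.pyRange_one_cons hiN]
      simp only [List.foldl_cons]
      have hstep := stepPreserve N K desk i eat c j hpre hi0 hiN hinv
      have := ih (i + 1) (stepA N K desk eat i)
        (stepB N K desk (c, j) i).1 (stepB N K desk (c, j) i).2
        (by omega) (by omega) hstep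
      simpa using this
    · rw [PySem.List.pyRange_one_eq_nil (by omega)]
      exact hinv.2.2.1

lemma initInv (N K : Int) (desk : List String) :
    HInv N K desk 0 (List.replicate N.toNat 0) 0 0 := by
  refine ⟨by simp, le_refl _, by simp, ?_⟩
  intro h hh hH
  refine ⟨fun hlt => absurd hlt (by omega), fun _ => List.getD_replicate 0 hh⟩

-- ===== VERDICT (by name: the statement is the Claim_ definition above) =====
theorem solution_spec : Claim_equal_solution := by
  intro N K desk _hdom hpre
  unfold Spec_solution solution solution_alt
  exact outer N K desk hpre N.toNat 0 (List.replicate N.toNat 0) 0 0 (by omega) (le_refl _)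
    (initInv N K desk)
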